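-- pv_equiv track=rewrite | github.com/AA5123/RFD40--RFD90-Mqqt-API-Reference | scripts/generate_openapi_tags_md.py | sort_operations
-- ===== SOURCE A (Python) =====
-- def sort_operations(operations, tag_config):
--    tag_groups = tag_config.get("tag_groups", {})
--    op_order = tag_config.get("operation_order", {})
--    tag_order = {}
--    for group_index, (_, tags) in enumerate(tag_groups.items()):
--        for tag_index, tag_name in enumerate(tags):
--            tag_order[tag_name] = (group_index, tag_index)
--    def key_fn(op_tuple):
--        op_name, tag, _, _ = op_tuple
--        order = tag_order.get(tag, (999, 999))
--        if tag in op_order: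
--            try:
--                op_index = op_order[tag].index(op_name)
--            except ValueError:
--                op_index = 999
--            return (order[0], order[1], op_index)
--        return (order[0], order[1], op_name)
--    return sorted(operations, key=key_fn)
-- ===== SOURCE B (Python) =====
-- def sort_operations(operations, tag_config):
--     groups = list(tag_config.get("tag_groups", {}).values())
--     op_order = tag_config.get("operation_order", {})
--
--     def pair_of(tag):
--         # last matching position wins, exactly like A's overwriting dict
--         pair = (999, 999)
--         for g, tags in enumerate(groups):
--             for t, name in enumerate(tags):
--                 if name == tag:
--                     pair = (g, t)
--         return pair
--
--     def within_key(op):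
--         name, tag = op[0], op[1]
--         if tag in op_order:
--             wanted = op_order[tag]
--             return wanted.index(name) if name in wanted else 999
--         return name
--
--     buckets = {}
--     for op in operations:
--         buckets.setdefault(pair_of(op[1]), []).append(op)
--
--     result = []
--     for pair in sorted(buckets):
--         result.extend(sorted(buckets[pair], key=within_key))
--     return result
-- ===== Notes on version B (the rewrite author's own statement) =====
-- stated objective: alternative
-- what changed: A builds a tag->position dict and does one whole-list stable sort under a composite (group,tag,op) key; B never builds that dict or sorts the whole list: it scans the tag-group positions to classify each operation, groups the operations into per-(group,tag)-pair buckets with setdefault/append, sorts only the bucket keys and each bucket's contents by the per-operation key, and concatenates the buckets. Pre_ excludes duplicate dict keys (resolving the assoc-list first-match vs Python-dict last-wins ambiguity; …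
import Mathlib
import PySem

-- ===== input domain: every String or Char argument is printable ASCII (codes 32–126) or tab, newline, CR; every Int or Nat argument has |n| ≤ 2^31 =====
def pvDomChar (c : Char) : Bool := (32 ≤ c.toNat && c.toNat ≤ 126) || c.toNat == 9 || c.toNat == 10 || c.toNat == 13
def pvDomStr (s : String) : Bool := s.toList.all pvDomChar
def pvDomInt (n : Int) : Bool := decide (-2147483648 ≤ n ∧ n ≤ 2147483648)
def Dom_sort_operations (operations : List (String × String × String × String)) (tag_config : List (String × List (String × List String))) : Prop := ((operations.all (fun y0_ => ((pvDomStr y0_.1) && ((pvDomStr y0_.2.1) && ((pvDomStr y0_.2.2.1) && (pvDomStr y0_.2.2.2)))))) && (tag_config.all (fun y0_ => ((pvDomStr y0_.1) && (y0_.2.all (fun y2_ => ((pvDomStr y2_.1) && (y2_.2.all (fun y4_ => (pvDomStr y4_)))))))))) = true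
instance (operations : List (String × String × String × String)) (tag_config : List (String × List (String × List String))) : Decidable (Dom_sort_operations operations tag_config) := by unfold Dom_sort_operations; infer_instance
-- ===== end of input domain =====

-- B drops A's whole-list composite-key sort and its tag->position dict: it classifies each
-- operation by scanning the tag-group positions directly, groups the operations into
-- per-(group,tag)-pair buckets, sorts the bucket keys and each bucket's contents
-- separately, and concatenates (objective: alternative decomposition, same cost class).
-- Python's heterogeneous per-operation key (an int for tags in operation_order, a str
-- otherwise) is encoded in BOTH ports as a flat List Int compared lexicographically
-- (strings by code point, a 0/1 marker ordering ints before strs); this is exact on Pre_,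
-- which excludes the inputs on which Python compares an int with a str and raises TypeError.

-- ===== PORT A =====
-- the tag_order dict built by A's double enumerate loop
def pvTagOrder (tag_groups : List (String × List String)) : PySem.Dict String (Int × Int) :=
  (PySem.List.enumerate tag_groups).foldl (fun d gp =>
    (PySem.List.enumerate gp.2.2).foldl (fun d2 tp => d2.insert tp.2 (gp.1, tp.1)) d)
    PySem.Dict.empty

-- the heterogeneous last slot of A's key tuple:
-- int branch i ↦ [0, i], str branch s ↦ [1] ++ code points of s; exact wherever Python does not raise
def pvOpKey (op_order : PySem.Dict String (List String)) (op_name tag : String) : List Int :=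
  if op_order.contains tag then
    [0, (((PySem.List.index? (op_order.getD tag []) op_name).map Int.ofNat).getD 999 : Int)]
  else
    1 :: op_name.toList.map (fun c => (c.toNat : Int))

def sort_operations (operations : List (String × String × String × String)) (tag_config : List (String × List (String × List String))) : List (String × String × String × String) :=
  let op_order := PySem.Dict.mk ((PySem.Dict.mk tag_config).getD "operation_order" [])
  let tag_order := pvTagOrder ((PySem.Dict.mk tag_config).getD "tag_groups" [])
  PySem.List.sorted operations (fun op =>
    (tag_order.getD op.2.1 (999, 999)).1 :: (tag_order.getD op.2.1 (999, 999)).2 ::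
      pvOpKey op_order op.1 op.2.1) false

-- ===== PORT B =====
-- Source B's pair_of: a direct scan over the enumerated tag-group positions, last match wins
def pvPairScan (groups : List (List String)) (tag : String) : Int × Int :=
  (PySem.List.enumerate groups).foldl (fun pr gp =>
    (PySem.List.enumerate gp.2).foldl (fun pr2 tp =>
      if tp.2 == tag then (gp.1, tp.1) else pr2) pr) (999, 999)

-- Source B's within_key, under the same List Int encoding of the heterogeneous Python key
def pvWithinKey (op_order : PySem.Dict String (List String)) (name tag : String) : List Int :=
  match op_order.get? tag with
  | some wanted => [0, (((PySem.List.index? wanted name).map Int.ofNat).getD 999 : Int)]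
  | none => 1 :: name.toList.map (fun c => (c.toNat : Int))

def sort_operations_alt (operations : List (String × String × String × String)) (tag_config : List (String × List (String × List String))) : List (String × String × String × String) :=
  let groups := ((PySem.Dict.mk tag_config).getD "tag_groups" []).map Prod.snd
  let op_order := PySem.Dict.mk ((PySem.Dict.mk tag_config).getD "operation_order" [])
  let buckets := operations.foldl
      (fun d op => d.modify (pvPairScan groups op.2.1) [] (· ++ [op]))
      (PySem.Dict.empty : PySem.Dict (Int × Int) (List (String × String × String × String)))
  (PySem.List.sorted buckets.keys (fun c => toLex c) false).foldl
    (fun res pr => res ++ PySem.List.sorted (buckets.getD pr [])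
        (fun op => pvWithinKey op_order op.1 op.2.1) false) []

-- ===== PRECONDITION & SPEC =====
-- Pre_ excludes (a) association lists with duplicate dict keys at any of the three dict levels, where
-- the Python-dict reading (last duplicate wins) and the assoc-list convention (first match) disagree,
-- and (b) operation lists containing two tags with the same (group,tag) sort pair of which exactly
-- one is in operation_order: there Python's sorted compares an int key with a str key and raises
-- TypeError, so A returns no value.
def Pre_sort_operations (operations : List (String × String × String × String)) (tag_config : List (String × List (String × List String))) : Prop :=
  (tag_config.map Prod.fst).Nodup ∧
  ((((PySem.Dict.mk tag_config).getD "tag_groups" []).map Prod.fst).Nodup) ∧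
  ((((PySem.Dict.mk tag_config).getD "operation_order" []).map Prod.fst).Nodup) ∧
  ∀ o1 ∈ operations, ∀ o2 ∈ operations,
    (pvTagOrder ((PySem.Dict.mk tag_config).getD "tag_groups" [])).getD o1.2.1 (999, 999) =
      (pvTagOrder ((PySem.Dict.mk tag_config).getD "tag_groups" [])).getD o2.2.1 (999, 999) →
    (PySem.Dict.mk ((PySem.Dict.mk tag_config).getD "operation_order" [])).contains o1.2.1 =
      (PySem.Dict.mk ((PySem.Dict.mk tag_config).getD "operation_order" [])).contains o2.2.1
instance (operations : List (String × String × String × String)) (tag_config : List (String × List (String × List String))) : Decidable (Pre_sort_operations operations tag_config) := by unfold Pre_sort_operations; infer_instance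

def pvWitness_sort_operations : (List (String × String × String × String)) × (List (String × List (String × List String))) :=
  ([("a", "t", "x", "y"), ("b", "u", "x", "y")],
   [("tag_groups", [("g", ["t", "u"])]), ("operation_order", [("t", ["a"])])])

def Spec_sort_operations (operations : List (String × String × String × String)) (tag_config : List (String × List (String × List String))) (out : List (String × String × String × String)) : Prop := out = sort_operations_alt operations tag_config
instance (operations : List (String × String × String × String)) (tag_config : List (String × List (String × List String))) (out : List (String × String × String × String)) : Decidable (Spec_sort_operations operations tag_config out) := by unfold Spec_sort_operations; infer_instance

-- ===== CLAIM (what is proved, stated in full; the proofs are below) =====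
def Claim_equal_sort_operations : Prop := ∀ (operations : List (String × String × String × String)) (tag_config : List (String × List (String × List String))), Dom_sort_operations operations tag_config → Pre_sort_operations operations tag_config → Spec_sort_operations operations tag_config (sort_operations operations tag_config)

-- ===== LEMMAS AND PROOFS =====

theorem pv_insertBy_append_right {α : Type} (p : α → α → Bool) (x : α) (as bs : List α)
    (h : ∀ a ∈ as, p x a = false) :
    PySem.List.insertBy p x (as ++ bs) = as ++ PySem.List.insertBy p x bs := by
  induction as with
  | nil => rfl
  | cons a as ih =>
      have ha := h a (by simp)
      simp [PySem.List.insertBy, ha, ih fun a ha' => h a (by simp [ha'])]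

theorem pv_insertBy_all_before {α : Type} (p : α → α → Bool) (x : α) (bs : List α)
    (h : ∀ b ∈ bs, p x b = true) :
    PySem.List.insertBy p x bs = x :: bs := by
  cases bs with
  | nil => rfl
  | cons b bs => simp [PySem.List.insertBy, h b (by simp)]

theorem pv_insertBy_append_left {α : Type} (p : α → α → Bool) (x : α) (as bs : List α)
    (h : ∀ b ∈ bs, p x b = true) :
    PySem.List.insertBy p x (as ++ bs) = PySem.List.insertBy p x as ++ bs := by
  induction as with
  | nil => simp [pv_insertBy_all_before p x bs h, PySem.List.insertBy]
  | cons a as ih =>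
      by_cases hp : p x a = true
      · simp [PySem.List.insertBy, hp]
      · simp only [Bool.not_eq_true] at hp
        simp [PySem.List.insertBy, hp, ih]

theorem pv_insertBy_congr {α : Type} (p q : α → α → Bool) (x : α) (ys : List α)
    (h : ∀ y ∈ ys, p x y = q x y) :
    PySem.List.insertBy p x ys = PySem.List.insertBy q x ys := by
  induction ys with
  | nil => rfl
  | cons y ys ih =>
      have hy := h y (by simp)
      by_cases hp : p x y = true
      · simp [PySem.List.insertBy, hp, hy ▸ hp]
      · simp only [Bool.not_eq_true] at hp
        simp [PySem.List.insertBy, hp, hy ▸ hp, ih fun y hy' => h y (by simp [hy'])]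

theorem pv_sorted_append_singleton {α κ : Type} [LT κ] [DecidableLT κ] (l : List α) (x : α)
    (key : α → κ) :
    PySem.List.sorted (l ++ [x]) key false =
      PySem.List.insertBy (fun a b => decide (key a < key b)) x (PySem.List.sorted l key false) := by
  rw [PySem.List.sorted_eq_foldl_insertBy, PySem.List.sorted_eq_foldl_insertBy, List.foldl_append]
  rfl

theorem pv_ofList_append_singleton {α : Type} [BEq α] [LawfulBEq α] (l : List α) (c : α) :
    PySem.Set.ofList (l ++ [c]) =
      if c ∈ l then PySem.Set.ofList l else PySem.Set.ofList l ++ [c] := by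
  have h0 : PySem.Set.ofList (l ++ [c]) = PySem.Set.add (PySem.Set.ofList l) c := by
    simp [PySem.Set.ofList, List.foldl_append]
  have hc : PySem.Set.contains (PySem.Set.ofList l) c = decide (c ∈ l) := by
    by_cases h : c ∈ l
    · have := (PySem.Set.mem_ofList l c).mpr h
      simp [PySem.Set.contains, this, h]
    · have : c ∉ PySem.Set.ofList l := fun hm => h ((PySem.Set.mem_ofList l c).mp hm)
      simp [PySem.Set.contains, this, h]
  rw [h0, PySem.Set.add, hc]
  by_cases h : c ∈ l <;> simp [h]

theorem pv_flatMap_congr {α β : Type} (f g : α → List β) (l : List α)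
    (h : ∀ a ∈ l, f a = g a) : l.flatMap f = l.flatMap g := by
  induction l with
  | nil => rfl
  | cons a l ih => simp [List.flatMap_cons, h a (by simp), ih fun a ha => h a (by simp [ha])]

theorem pv_sorted_classes_pairwise (l : List (Int × Int)) :
    (PySem.List.sorted (PySem.Set.ofList l) (fun c => toLex c) false).Pairwise
      (fun a b => toLex a < toLex b) := by
  have hle := PySem.List.sorted_pairwise (PySem.Set.ofList l) (fun c => toLex c)
  have hnd : (PySem.List.sorted (PySem.Set.ofList l) (fun c => toLex c) false).Nodup :=
    (PySem.List.sorted_perm (PySem.Set.ofList l) (fun c => toLex c) false).symm.nodup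
      (PySem.Set.nodup_ofList l)
  exact (hle.and hnd).imp fun ⟨h1, h2⟩ => lt_of_le_of_ne h1 (fun he => h2 (toLex_inj.mp he))

theorem pv_insertBy_sorted_split (x : Int × Int) (C : List (Int × Int))
    (hC : C.Pairwise (fun a b => toLex a < toLex b)) :
    ∃ C₁ C₂, PySem.List.insertBy (fun a b => decide (toLex a < toLex b)) x C = C₁ ++ x :: C₂ ∧
      C = C₁ ++ C₂ ∧ (∀ c ∈ C₁, ¬ toLex x < toLex c) ∧ (∀ c ∈ C₂, toLex x < toLex c) := by
  induction C with
  | nil => exact ⟨[], [], rfl, rfl, by simp, by simp⟩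
  | cons c C ih =>
      rcases List.pairwise_cons.mp hC with ⟨hhead, htail⟩
      by_cases hp : toLex x < toLex c
      · refine ⟨[], c :: C, ?_, rfl, by simp, ?_⟩
        · simp [PySem.List.insertBy, hp]
        · intro d hd
          rcases List.mem_cons.mp hd with h | h
          · exact h ▸ hp
          · exact lt_trans hp (hhead d h)
      · rcases ih htail with ⟨C₁, C₂, he, hsp, h1, h2⟩
        refine ⟨c :: C₁, C₂, ?_, by simp [hsp], ?_, h2⟩
        · simp [PySem.List.insertBy, hp, he]
        · intro d hd
          rcases List.mem_cons.mp hd with h | h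
          · exact h ▸ hp
          · exact h1 d h

theorem pv_grouped_sort {α : Type} (cls : α → Int × Int) (k3 : α → List Int)
    (ops : List α) :
    PySem.List.sorted ops (fun z => (cls z).1 :: (cls z).2 :: k3 z) false
      = (PySem.List.sorted (PySem.Set.ofList (ops.map cls)) (fun c => toLex c) false).flatMap
          (fun c => PySem.List.sorted (ops.filter (fun z => cls z == c)) k3 false) := by
  induction ops using List.reverseRecOn with
  | nil => rfl
  | append_singleton p x ih =>
    set key : α → List Int := fun z => (cls z).1 :: (cls z).2 :: k3 z with hkeydef
    set bf : α → α → Bool := fun a b => decide (key a < key b) with hbfdef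
    set b3 : α → α → Bool := fun a b => decide (k3 a < k3 b) with hb3def
    set F : (Int × Int) → List α :=
      fun c => PySem.List.sorted (p.filter (fun z => cls z == c)) k3 false with hFdef
    set F' : (Int × Int) → List α :=
      fun c => PySem.List.sorted ((p ++ [x]).filter (fun z => cls z == c)) k3 false with hF'def
    set C : List (Int × Int) :=
      PySem.List.sorted (PySem.Set.ofList (p.map cls)) (fun c => toLex c) false with hCdef
    have hmemC : ∀ c, c ∈ C ↔ c ∈ p.map cls := by
      intro c
      rw [hCdef, PySem.List.mem_sorted, PySem.Set.mem_ofList]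
    have hpw : C.Pairwise (fun a b => toLex a < toLex b) := by
      rw [hCdef]; exact pv_sorted_classes_pairwise _
    have hclsF : ∀ c y, y ∈ F c → cls y = c := by
      intro c y hy
      rw [hFdef] at hy
      rw [PySem.List.mem_sorted] at hy
      exact beq_iff_eq.mp (List.mem_filter.mp hy).2
    have hF'ne : ∀ c, c ≠ cls x → F' c = F c := by
      intro c hc
      rw [hF'def, hFdef]
      have hb : (cls x == c) = false := beq_eq_false_iff_ne.mpr (fun h => hc h.symm)
      simp [List.filter_append, hb]
    have hF'x : F' (cls x) = PySem.List.insertBy b3 x (F (cls x)) := by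
      rw [hF'def, hFdef]
      dsimp only
      rw [List.filter_append]
      simp only [List.filter_cons, List.filter_nil, beq_self_eq_true, if_true]
      exact pv_sorted_append_singleton _ _ _
    have hkeylt : ∀ a b : α, key a < key b ↔
        (toLex (cls a) < toLex (cls b) ∨ (cls a = cls b ∧ k3 a < k3 b)) := by
      intro a b
      simp only [hkeydef]
      rw [List.cons_lt_cons_iff, List.cons_lt_cons_iff, Prod.Lex.toLex_lt_toLex, Prod.ext_iff]
      tauto
    have hbf_false : ∀ y, toLex (cls y) < toLex (cls x) → bf x y = false := by
      intro y h
      refine decide_eq_false ?_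
      rw [hkeylt]
      rintro (h' | ⟨h', _⟩)
      · exact lt_asymm h' h
      · exact (ne_of_gt h) (congrArg toLex h')
    have hbf_true : ∀ y, toLex (cls x) < toLex (cls y) → bf x y = true := by
      intro y h
      exact decide_eq_true ((hkeylt x y).mpr (Or.inl h))
    have hbf_eq : ∀ y, cls y = cls x → bf x y = b3 x y := by
      intro y h
      simp only [hbfdef, hb3def]
      rw [decide_eq_decide, hkeylt]
      constructor
      · rintro (h' | ⟨_, h'⟩)
        · exact absurd (h ▸ h') (lt_irrefl _)
        · exact h'
      · intro h'
        exact Or.inr ⟨h.symm, h'⟩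
    have hL : PySem.List.sorted (p ++ [x]) key false = PySem.List.insertBy bf x (C.flatMap F) := by
      rw [pv_sorted_append_singleton, ih, hbfdef]
    rw [hL]
    have hmap : (p ++ [x]).map cls = p.map cls ++ [cls x] := by simp
    rw [hmap]
    by_cases hmemx : cls x ∈ p.map cls
    · have hC' : PySem.List.sorted (PySem.Set.ofList (p.map cls ++ [cls x]))
          (fun c => toLex c) false = C := by
        rw [pv_ofList_append_singleton]
        rw [if_pos hmemx, hCdef]
      rw [hC']
      obtain ⟨C₁, C₂, hsplit⟩ := List.append_of_mem ((hmemC (cls x)).mpr hmemx)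
      have hpw' := hsplit ▸ hpw
      rcases List.pairwise_append.mp hpw' with ⟨_, pw2, hcross⟩
      have h1 : ∀ c ∈ C₁, toLex c < toLex (cls x) := fun c hc => hcross c hc (cls x) (by simp)
      have h2 : ∀ c ∈ C₂, toLex (cls x) < toLex c := (List.pairwise_cons.mp pw2).1
      have hne1 : ∀ c ∈ C₁, c ≠ cls x := fun c hc he => absurd (h1 c hc) (by rw [he]; exact lt_irrefl _)
      have hne2 : ∀ c ∈ C₂, c ≠ cls x := fun c hc he => absurd (h2 c hc) (by rw [he]; exact lt_irrefl _)
      rw [hsplit]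
      simp only [List.flatMap_append, List.flatMap_cons]
      rw [pv_insertBy_append_right bf x (C₁.flatMap F) _ (by
        intro y hy
        obtain ⟨c, hc, hyc⟩ := List.mem_flatMap.mp hy
        exact hbf_false y (hclsF c y hyc ▸ h1 c hc))]
      rw [pv_insertBy_append_left bf x (F (cls x)) (C₂.flatMap F) (by
        intro y hy
        obtain ⟨c, hc, hyc⟩ := List.mem_flatMap.mp hy
        exact hbf_true y (hclsF c y hyc ▸ h2 c hc))]
      rw [pv_insertBy_congr bf b3 x (F (cls x)) (fun y hy => hbf_eq y (hclsF _ y hy))]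
      rw [pv_flatMap_congr F' F C₁ (fun c hc => hF'ne c (hne1 c hc))]
      rw [pv_flatMap_congr F' F C₂ (fun c hc => hF'ne c (hne2 c hc))]
      rw [hF'x]
    · have hC' : PySem.List.sorted (PySem.Set.ofList (p.map cls ++ [cls x]))
          (fun c => toLex c) false =
          PySem.List.insertBy (fun a b => decide (toLex a < toLex b)) (cls x) C := by
        rw [pv_ofList_append_singleton, if_neg hmemx]
        rw [pv_sorted_append_singleton, hCdef]
      obtain ⟨C₁, C₂, hins, hCeq, hno, hyes⟩ := pv_insertBy_sorted_split (cls x) C hpw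
      rw [hC', hins]
      have hlt1 : ∀ c ∈ C₁, toLex c < toLex (cls x) := by
        intro c hc
        have hcC : c ∈ C := hCeq ▸ List.mem_append_left C₂ hc
        have hcp : c ∈ p.map cls := (hmemC c).mp hcC
        have hne : c ≠ cls x := fun he => hmemx (he ▸ hcp)
        exact lt_of_le_of_ne (not_lt.mp (hno c hc)) (fun he => hne (toLex_inj.mp he))
      have hne1 : ∀ c ∈ C₁, c ≠ cls x :=
        fun c hc he => absurd (hlt1 c hc) (by rw [he]; exact lt_irrefl _)
      have hne2 : ∀ c ∈ C₂, c ≠ cls x :=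
        fun c hc he => absurd (hyes c hc) (by rw [he]; exact lt_irrefl _)
      have hfilzero : p.filter (fun z => cls z == cls x) = [] := by
        rw [List.filter_eq_nil_iff]
        intro y hy
        simp only [beq_iff_eq]
        exact fun he => hmemx (he ▸ List.mem_map_of_mem hy)
      have hF'xnil : F' (cls x) = [x] := by
        rw [hF'def]
        dsimp only
        rw [List.filter_append, hfilzero]
        simp only [List.filter_cons, List.filter_nil, beq_self_eq_true, if_true, List.nil_append]
        rfl
      rw [hCeq]
      simp only [List.flatMap_append, List.flatMap_cons]
      rw [pv_insertBy_append_right bf x (C₁.flatMap F) _ (by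
        intro y hy
        obtain ⟨c, hc, hyc⟩ := List.mem_flatMap.mp hy
        exact hbf_false y (hclsF c y hyc ▸ hlt1 c hc))]
      rw [pv_insertBy_all_before bf x (C₂.flatMap F) (by
        intro y hy
        obtain ⟨c, hc, hyc⟩ := List.mem_flatMap.mp hy
        exact hbf_true y (hclsF c y hyc ▸ hyes c hc))]
      rw [pv_flatMap_congr F' F C₁ (fun c hc => hF'ne c (hne1 c hc))]
      rw [pv_flatMap_congr F' F C₂ (fun c hc => hF'ne c (hne2 c hc))]
      rw [hF'xnil]
      simp

-- bridging B's scan/bucket decomposition to A's dict: getD of an insert loop is a last-match fold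
theorem pv_getD_foldl_insert_pairs (L : List (String × (Int × Int)))
    (d : PySem.Dict String (Int × Int)) (tag : String) (dflt : Int × Int) :
    (L.foldl (fun d p => d.insert p.1 p.2) d).getD tag dflt
      = L.foldl (fun acc p => if p.1 == tag then p.2 else acc) (d.getD tag dflt) := by
  induction L generalizing d with
  | nil => rfl
  | cons p L ih =>
      simp only [List.foldl_cons, ih]
      congr 1
      rw [PySem.Dict.getD_insert]
      by_cases h : p.1 = tag
      · simp [h]
      · simp [h, Ne.symm h]

theorem pv_enumerate_map {α β : Type} (f : α → β) (l : List α) (s : Int) :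
    PySem.List.enumerate (l.map f) s = (PySem.List.enumerate l s).map (fun p => (p.1, f p.2)) := by
  induction l generalizing s with
  | nil => rfl
  | cons a l ih => simp [PySem.List.enumerate_cons, ih]

theorem pv_tagorder_flatten (E : List (Int × (String × List String)))
    (d : PySem.Dict String (Int × Int)) :
    E.foldl (fun d gp =>
        (PySem.List.enumerate gp.2.2).foldl (fun d2 tp => d2.insert tp.2 (gp.1, tp.1)) d) d
      = (E.flatMap (fun gp =>
          (PySem.List.enumerate gp.2.2).map (fun tp => (tp.2, ((gp.1, tp.1) : Int × Int))))).foldl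
          (fun d p => d.insert p.1 p.2) d := by
  induction E generalizing d with
  | nil => rfl
  | cons gp E ih =>
      simp only [List.foldl_cons, List.flatMap_cons, List.foldl_append, List.foldl_map]
      exact ih _

theorem pv_pairscan_flatten (E : List (Int × (String × List String))) (pr : Int × Int)
    (tag : String) :
    E.foldl (fun pr gp =>
        (PySem.List.enumerate gp.2.2).foldl
          (fun pr2 tp => if tp.2 == tag then (gp.1, tp.1) else pr2) pr) pr
      = (E.flatMap (fun gp =>
          (PySem.List.enumerate gp.2.2).map (fun tp => (tp.2, ((gp.1, tp.1) : Int × Int))))).foldl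
          (fun acc p => if p.1 == tag then p.2 else acc) pr := by
  induction E generalizing pr with
  | nil => rfl
  | cons gp E ih =>
      simp only [List.foldl_cons, List.flatMap_cons, List.foldl_append, List.foldl_map]
      exact ih _

theorem pv_pairScan_eq_tagOrder (tg : List (String × List String)) (tag : String) :
    pvPairScan (tg.map Prod.snd) tag = (pvTagOrder tg).getD tag (999, 999) := by
  unfold pvPairScan pvTagOrder
  rw [pv_enumerate_map, List.foldl_map]
  dsimp only
  rw [pv_pairscan_flatten, pv_tagorder_flatten, pv_getD_foldl_insert_pairs,
    PySem.Dict.getD_empty]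

theorem pv_withinKey_eq_opKey (oo : PySem.Dict String (List String)) (name tag : String) :
    pvWithinKey oo name tag = pvOpKey oo name tag := by
  unfold pvWithinKey pvOpKey
  rw [PySem.Dict.contains_eq_isSome_get?, PySem.Dict.getD_eq_get?_getD]
  cases oo.get? tag <;> simp

theorem pv_buckets_keys {α : Type} (cls : α → Int × Int) (ops : List α) :
    (ops.foldl (fun d op => d.modify (cls op) [] (· ++ [op]))
        (PySem.Dict.empty : PySem.Dict (Int × Int) (List α))).keys
      = PySem.Set.ofList (ops.map cls) := by
  rw [PySem.Dict.keys_foldl_modify_key, PySem.Dict.keys_empty, PySem.Set.ofList_eq_foldl]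
  rfl

theorem pv_buckets_getD {α : Type} [BEq α] (cls : α → Int × Int) (ops : List α)
    (c : Int × Int) :
    (ops.foldl (fun d op => d.modify (cls op) [] (· ++ [op]))
        (PySem.Dict.empty : PySem.Dict (Int × Int) (List α))).getD c []
      = ops.filter (fun op => cls op == c) := by
  have h : ops.foldl (fun d op => d.modify (cls op) [] (· ++ [op]))
        (PySem.Dict.empty : PySem.Dict (Int × Int) (List α))
      = (ops.map (fun op => (cls op, op))).foldl
          (fun d p => d.modify p.1 [] (· ++ [p.2])) PySem.Dict.empty := by
    rw [List.foldl_map]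
  rw [h, PySem.Dict.getD_foldl_modify_append, PySem.Dict.getD_empty]
  clear h
  induction ops with
  | nil => rfl
  | cons op ops ih =>
      by_cases hc : (cls op == c) = true
      · simp only [List.map_cons, List.filter_cons, hc, if_true, List.map_cons] at *
        simpa using ih
      · simp only [Bool.not_eq_true] at hc
        simp only [List.map_cons, List.filter_cons, hc, Bool.false_eq_true, if_false] at *
        simpa using ih

-- ===== VERDICT (by name: the statement is the Claim_ definition above) =====
theorem sort_operations_spec : Claim_equal_sort_operations := by
  intro operations tag_config _ _
  unfold Spec_sort_operations sort_operations sort_operations_alt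
  dsimp only
  rw [pv_grouped_sort
    (fun op => (pvTagOrder ((PySem.Dict.mk tag_config).getD "tag_groups" [])).getD op.2.1 (999, 999))
    (fun op => pvOpKey (PySem.Dict.mk ((PySem.Dict.mk tag_config).getD "operation_order" [])) op.1 op.2.1)
    operations]
  rw [PySem.List.foldl_append_eq_flatMap, List.nil_append]
  have hcls : ∀ op : String × String × String × String,
      pvPairScan (((PySem.Dict.mk tag_config).getD "tag_groups" []).map Prod.snd) op.2.1
        = (pvTagOrder ((PySem.Dict.mk tag_config).getD "tag_groups" [])).getD op.2.1 (999, 999) :=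
    fun op => pv_pairScan_eq_tagOrder _ _
  rw [pv_buckets_keys, List.map_congr_left (fun op _ => hcls op)]
  refine (pv_flatMap_congr _ _ _ (fun c _ => ?_)).symm
  rw [pv_buckets_getD]
  rw [List.filter_congr (fun op _ => by rw [hcls op])]
  exact congrArg (fun k => PySem.List.sorted _ k false)
    (funext fun op => pv_withinKey_eq_opKey _ op.1 op.2.1)
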